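-- pv_equiv track=rewrite | github.com/Exa-Networks/exabgp | scripts/migrate_bytes_to_buffer.py | find_import_insertion_point
-- ===== SOURCE A (Python) =====
-- def find_import_insertion_point(lines: list[str]) -> int:
--     """Find the best line to insert the Buffer import.
--
--     Strategy:
--     1. Look for existing exabgp imports and insert after last one
--     2. Otherwise, insert after the last import from exabgp
--     3. Otherwise, insert after the last from/import line
--     4. Otherwise, insert after __future__ imports
--     """
--     last_exabgp_import = -1
--     last_import = -1
--     last_future = -1
--
--     for i, line in enumerate(lines):
--         stripped = line.strip()
--         if stripped.startswith('from __future__'):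
--             last_future = i
--         elif stripped.startswith('from exabgp.') or stripped.startswith('import exabgp.'):
--             last_exabgp_import = i
--         elif stripped.startswith('from ') or stripped.startswith('import '):
--             last_import = i
--
--     # Prefer inserting after existing exabgp imports
--     if last_exabgp_import >= 0:
--         return last_exabgp_import + 1
--     # Otherwise after any imports
--     if last_import >= 0:
--         return last_import + 1
--     # Otherwise after __future__
--     if last_future >= 0:
--         return last_future + 1
--     # Fallback: after any docstring/comments at the top
--     return 0
-- ===== SOURCE B (Python) =====
-- def find_import_insertion_point(lines: list) -> int:
--     """Find the best line to insert the Buffer import (classification-by-lists version)."""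
--     stripped = [l.strip() for l in lines]
--     future = [i for i, s in enumerate(stripped) if s.startswith('from __future__')]
--     exabgp = [i for i, s in enumerate(stripped)
--               if not s.startswith('from __future__')
--               and (s.startswith('from exabgp.') or s.startswith('import exabgp.'))]
--     other = [i for i, s in enumerate(stripped)
--              if not s.startswith('from __future__')
--              and not (s.startswith('from exabgp.') or s.startswith('import exabgp.'))
--              and (s.startswith('from ') or s.startswith('import '))]
--     if exabgp:
--         return exabgp[-1] + 1
--     if other:
--         return other[-1] + 1
--     if future:
--         return future[-1] + 1
--     return 0
-- ===== Notes on version B (the rewrite author's own statement) =====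
-- stated objective: alternative
-- what changed: Replaces the single fold that tracks three 'last seen index' sentinels with three mutually exclusive index-list comprehensions over the stripped lines, then picks the answer by priority from the last element of the first non-empty list.
import Mathlib
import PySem

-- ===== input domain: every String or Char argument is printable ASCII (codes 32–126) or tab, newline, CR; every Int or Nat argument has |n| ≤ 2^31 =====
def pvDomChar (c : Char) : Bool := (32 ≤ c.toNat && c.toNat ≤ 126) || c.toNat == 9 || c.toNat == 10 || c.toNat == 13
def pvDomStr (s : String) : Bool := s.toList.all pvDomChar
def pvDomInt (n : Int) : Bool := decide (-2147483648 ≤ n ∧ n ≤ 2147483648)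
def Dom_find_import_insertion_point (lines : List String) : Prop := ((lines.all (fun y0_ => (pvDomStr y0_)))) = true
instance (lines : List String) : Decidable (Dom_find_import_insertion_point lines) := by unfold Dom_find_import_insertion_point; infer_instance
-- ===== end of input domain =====

-- B replaces A's single fold over three sentinel variables by three mutually exclusive
-- index-list comprehensions plus a priority pick of the last element (objective: alternative).

-- ===== PORT A =====
-- state (last_exabgp_import, last_import, last_future), all initialised to -1
def find_import_insertion_point (lines : List String) : Int :=
  let r := (PySem.List.enumerate lines 0).foldl
    (fun (st : Int × Int × Int) (p : Int × String) =>
      let stripped := PySem.Str.strip p.2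
      if PySem.Str.startswith stripped "from __future__" then (st.1, st.2.1, p.1)
      else if PySem.Str.startswith stripped "from exabgp." || PySem.Str.startswith stripped "import exabgp." then (p.1, st.2.1, st.2.2)
      else if PySem.Str.startswith stripped "from " || PySem.Str.startswith stripped "import " then (st.1, p.1, st.2.2)
      else st)
    (-1, -1, -1)
  if r.1 ≥ 0 then r.1 + 1
  else if r.2.1 ≥ 0 then r.2.1 + 1
  else if r.2.2 ≥ 0 then r.2.2 + 1
  else 0

-- ===== PORT B =====
def pvIsFuture (s : String) : Bool := PySem.Str.startswith s "from __future__"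
def pvIsExabgp (s : String) : Bool :=
  !pvIsFuture s && (PySem.Str.startswith s "from exabgp." || PySem.Str.startswith s "import exabgp.")
def pvIsOther (s : String) : Bool :=
  !pvIsFuture s && !(PySem.Str.startswith s "from exabgp." || PySem.Str.startswith s "import exabgp.")
    && (PySem.Str.startswith s "from " || PySem.Str.startswith s "import ")

def find_import_insertion_point_alt (lines : List String) : Int :=
  let stripped := lines.map PySem.Str.strip
  let en := PySem.List.enumerate stripped 0
  let future := (en.filter (fun p => pvIsFuture p.2)).map (·.1)
  let exabgp := (en.filter (fun p => pvIsExabgp p.2)).map (·.1)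
  let other := (en.filter (fun p => pvIsOther p.2)).map (·.1)
  match exabgp.getLast? with
  | some i => i + 1
  | none =>
    match other.getLast? with
    | some i => i + 1
    | none =>
      match future.getLast? with
      | some i => i + 1
      | none => 0

-- ===== PRECONDITION & SPEC =====
def Spec_find_import_insertion_point (lines : List String) (out : Int) : Prop := out = find_import_insertion_point_alt lines
instance (lines : List String) (out : Int) : Decidable (Spec_find_import_insertion_point lines out) := by unfold Spec_find_import_insertion_point; infer_instance

-- ===== CLAIM (what is proved, stated in full; the proofs are below) =====
def Claim_equal_find_import_insertion_point : Prop := ∀ (lines : List String), Dom_find_import_insertion_point lines → Spec_find_import_insertion_point lines (find_import_insertion_point lines)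

-- ===== LEMMAS AND PROOFS =====

-- "last index matching q, default d" as a fold
def pvLastD (q : String → Bool) (ps : List (Int × String)) (d : Int) : Int :=
  ps.foldl (fun acc p => if q p.2 then p.1 else acc) d

theorem pvEnumerate_map {α β : Type} (f : α → β) (xs : List α) (s : Int) :
    PySem.List.enumerate (xs.map f) s = (PySem.List.enumerate xs s).map (fun p => (p.1, f p.2)) := by
  induction xs generalizing s with
  | nil => simp [PySem.List.enumerate_nil]
  | cons x xs ih => simp [PySem.List.enumerate_cons, ih]

-- A's loop with abstract tests splits into three independent "last index" folds
theorem pvFold_split_gen (F E O : (Int × String) → Bool) (ps : List (Int × String)) (e imp f : Int) :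
    ps.foldl
      (fun (st : Int × Int × Int) (p : Int × String) =>
        if F p then (st.1, st.2.1, p.1)
        else if E p then (p.1, st.2.1, st.2.2)
        else if O p then (st.1, p.1, st.2.2)
        else st)
      (e, imp, f)
    = (ps.foldl (fun acc p => if !F p && E p then p.1 else acc) e,
       ps.foldl (fun acc p => if (!F p && !E p) && O p then p.1 else acc) imp,
       ps.foldl (fun acc p => if F p then p.1 else acc) f) := by
  induction ps generalizing e imp f with
  | nil => rfl
  | cons p ps ih =>
    cases hF : F p <;> cases hE : E p <;> cases hO : O p <;>
      simp [hF, hE, hO, ih]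

theorem pvFold_split (ps : List (Int × String)) (e imp f : Int) :
    ps.foldl
      (fun (st : Int × Int × Int) (p : Int × String) =>
        let stripped := PySem.Str.strip p.2
        if PySem.Str.startswith stripped "from __future__" then (st.1, st.2.1, p.1)
        else if PySem.Str.startswith stripped "from exabgp." || PySem.Str.startswith stripped "import exabgp." then (p.1, st.2.1, st.2.2)
        else if PySem.Str.startswith stripped "from " || PySem.Str.startswith stripped "import " then (st.1, p.1, st.2.2)
        else st)
      (e, imp, f)
    = (pvLastD (fun l => pvIsExabgp (PySem.Str.strip l)) ps e,
       pvLastD (fun l => pvIsOther (PySem.Str.strip l)) ps imp,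
       pvLastD (fun l => pvIsFuture (PySem.Str.strip l)) ps f) :=
  pvFold_split_gen
    (fun p => PySem.Str.startswith (PySem.Str.strip p.2) "from __future__")
    (fun p => PySem.Str.startswith (PySem.Str.strip p.2) "from exabgp." || PySem.Str.startswith (PySem.Str.strip p.2) "import exabgp.")
    (fun p => PySem.Str.startswith (PySem.Str.strip p.2) "from " || PySem.Str.startswith (PySem.Str.strip p.2) "import ")
    ps e imp f

theorem pvGetLast?_getD_cons (a d : Int) (l : List Int) :
    ((a :: l).getLast?).getD d = (l.getLast?).getD a := by
  cases l with
  | nil => rfl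
  | cons b t => rw [List.getLast?_cons_cons]; simp [List.getLast?_cons]

theorem pvLastD_eq_getLast? (q : String → Bool) (ps : List (Int × String)) (d : Int) :
    pvLastD q ps d = (((ps.filter (fun p => q p.2)).map (·.1)).getLast?).getD d := by
  induction ps generalizing d with
  | nil => simp [pvLastD]
  | cons p ps ih =>
    have hc : pvLastD q (p :: ps) d = pvLastD q ps (if q p.2 then p.1 else d) := rfl
    by_cases h : q p.2
    · rw [hc, if_pos h, ih, List.filter_cons, if_pos h, List.map_cons, pvGetLast?_getD_cons]
    · rw [hc, if_neg h, ih, List.filter_cons, if_neg h]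

theorem pvMem_enum_nonneg (lines : List String) (q : String → Bool) (i : Int)
    (h : (((PySem.List.enumerate lines 0).filter (fun p => q p.2)).map (·.1)).getLast? = some i) :
    0 ≤ i := by
  have hm : i ∈ ((PySem.List.enumerate lines 0).filter (fun p => q p.2)).map (·.1) :=
    List.mem_of_getLast? h
  simp only [List.mem_map, List.mem_filter] at hm
  obtain ⟨p, ⟨hp, -⟩, rfl⟩ := hm
  rw [PySem.List.mem_enumerate_iff] at hp
  obtain ⟨k, hk, rfl⟩ := hp
  simp

-- ===== VERDICT (by name: the statement is the Claim_ definition above) =====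
theorem find_import_insertion_point_spec : Claim_equal_find_import_insertion_point := by
  intro lines _
  show _ = _
  unfold find_import_insertion_point find_import_insertion_point_alt
  simp only [pvEnumerate_map, List.filter_map, List.map_map, pvFold_split, pvLastD_eq_getLast?]
  have comp : ∀ (q : String → Bool),
      (List.map ((·.1) ∘ fun (p : Int × String) => (p.1, PySem.Str.strip p.2))
        (List.filter ((fun p => q p.2) ∘ fun (p : Int × String) => (p.1, PySem.Str.strip p.2))
          (PySem.List.enumerate lines 0)))
      = (List.map (·.1) (List.filter (fun p => q (PySem.Str.strip p.2)) (PySem.List.enumerate lines 0))) := fun q => rfl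
  rw [comp, comp, comp]
  generalize hE : (((PySem.List.enumerate lines 0).filter (fun p => pvIsExabgp (PySem.Str.strip p.2))).map (·.1)).getLast? = E
  generalize hO : (((PySem.List.enumerate lines 0).filter (fun p => pvIsOther (PySem.Str.strip p.2))).map (·.1)).getLast? = O
  generalize hF : (((PySem.List.enumerate lines 0).filter (fun p => pvIsFuture (PySem.Str.strip p.2))).map (·.1)).getLast? = F
  cases E with
  | some i =>
    have hnn := pvMem_enum_nonneg lines (fun l => pvIsExabgp (PySem.Str.strip l)) i hE
    simp only [Option.getD_some]
    rw [if_pos (by omega : (i : Int) ≥ 0)]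
  | none =>
    simp only [Option.getD_none]
    rw [if_neg (by omega : ¬ ((-1 : Int) ≥ 0))]
    cases O with
    | some i =>
      have hnn := pvMem_enum_nonneg lines (fun l => pvIsOther (PySem.Str.strip l)) i hO
      simp only [Option.getD_some]
      rw [if_pos (by omega : (i : Int) ≥ 0)]
    | none =>
      simp only [Option.getD_none]
      rw [if_neg (by omega : ¬ ((-1 : Int) ≥ 0))]
      cases F with
      | some i =>
        have hnn := pvMem_enum_nonneg lines (fun l => pvIsFuture (PySem.Str.strip l)) i hF
        simp only [Option.getD_some]
        rw [if_pos (by omega : (i : Int) ≥ 0)]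
      | none =>
        simp only [Option.getD_none]
        rw [if_neg (by omega : ¬ ((-1 : Int) ≥ 0))]
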